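-- pv_equiv track=rewrite | github.com/amrithajayadev/misc | longest_prefix_string.py | longestPrefixStringInArray
-- ===== SOURCE A (Python) =====
-- def find_prefix(str1, str2):
--     n1 = len(str1)
--     n2 = len(str2)
--     i = 0
--     j = 0
--     prefix = []
--     while i < n1 and j < n2:
--         if str1[i] == str2[j]:
--             prefix.append(str1[i])
--             i += 1
--             j += 1
--         else:
--             break
--     return "".join(prefix)
--
-- def longestPrefixStringInArray(arr1, arr2):
--     arr1.sort()
--     arr2.sort()
--
--     str1 = [str(i) for i in arr1]
--     str2 = [str(i) for i in arr2]
--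
--     n1 = len(str1)
--     n2 = len(str2)
--     max_prefix = ""
--     for i in range(n1 - 1, -1, -1):
--         for j in range(n2 - 1, -1, -1):
--             curr_prefix = find_prefix(str1[i], str2[j])
--             if len(curr_prefix) > len(max_prefix):
--                 max_prefix = curr_prefix
--     return max_prefix
-- ===== SOURCE B (Python) =====
-- def longestPrefixStringInArray(arr1, arr2):
--     arr1.sort()
--     arr2.sort()  # A also sorts arr2 in place; kept for the same side effect
--     # trie of the decimal strings of arr2
--     root = {}
--     for x in arr2:
--         node = root
--         for c in str(x):
--             node = node.setdefault(c, {})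
--     # for each string of sorted arr1 (ascending, >= keeps the later winner,
--     # matching A's descending scan with strict >), walk the trie
--     best = ""
--     for x in arr1:
--         s = str(x)
--         node = root
--         l = 0
--         for c in s:
--             if c not in node:
--                 break
--             node = node[c]
--             l += 1
--         if l >= len(best):
--             best = s[:l]
--     return best
-- ===== Notes on version B (the rewrite author's own statement) =====
-- stated objective: faster
-- what changed: Replaces A's all-pairs double scan (longest common prefix of every stringified arr1/arr2 pair) with a trie built once from arr2's strings and a single walk per arr1 string, tracking the best with >= over ascending sorted order (which equals A's strict > over descending order).
import Mathlib
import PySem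

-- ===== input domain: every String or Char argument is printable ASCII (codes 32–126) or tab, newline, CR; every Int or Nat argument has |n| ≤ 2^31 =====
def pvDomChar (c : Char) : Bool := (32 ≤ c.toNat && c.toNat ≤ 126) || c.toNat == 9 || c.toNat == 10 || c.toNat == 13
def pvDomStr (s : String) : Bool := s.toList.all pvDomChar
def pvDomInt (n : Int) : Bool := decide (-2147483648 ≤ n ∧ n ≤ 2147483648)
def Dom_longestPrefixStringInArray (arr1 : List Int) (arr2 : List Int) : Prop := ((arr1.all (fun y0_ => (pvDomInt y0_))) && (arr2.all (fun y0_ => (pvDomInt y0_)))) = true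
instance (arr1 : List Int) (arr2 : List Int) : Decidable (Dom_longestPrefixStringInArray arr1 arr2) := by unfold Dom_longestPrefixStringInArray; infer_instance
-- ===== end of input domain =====

-- B replaces A's all-pairs double scan with a trie of arr2's strings walked once per arr1
-- string; both ports sort their list arguments as the Pythons do in place (the equivalence
-- proved is about the return value).


-- ===== PORT A =====

-- find_prefix's while loop (strings handled as List Char, per the PySem convention)
def findPrefixChars : List Char → List Char → List Char
  | a :: as, b :: bs => if a = b then a :: findPrefixChars as bs else []
  | _, _ => []

def longestPrefixStringInArray (arr1 : List Int) (arr2 : List Int) : String :=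
  let a1 := PySem.List.sorted arr1 (fun x => x) false
  let a2 := PySem.List.sorted arr2 (fun x => x) false
  let str1 := a1.map PySem.Int.toChars
  let str2 := a2.map PySem.Int.toChars
  let n1 : Int := str1.length
  let n2 : Int := str2.length
  let maxPrefix :=
    (PySem.List.pyRange (n1 - 1) (-1) (-1)).foldl (fun m i =>
      (PySem.List.pyRange (n2 - 1) (-1) (-1)).foldl (fun m j =>
        let curr := findPrefixChars (PySem.List.pyGetD str1 i []) (PySem.List.pyGetD str2 j [])
        if curr.length > m.length then curr else m) m) []
  String.ofList maxPrefix

-- ===== PORT B =====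

-- trie: a node is its list of children (the dict-of-dicts of Source B);
-- PTrie.nil is the empty dict, kid c t rest = one entry 'c -> t' plus the remaining entries
inductive PTrie where
  | nil
  | kid : Char → PTrie → PTrie → PTrie

def findKid : PTrie → Char → Option PTrie
  | .nil, _ => none
  | .kid d t rest, c => if d = c then some t else findKid rest c

def setKid : PTrie → Char → PTrie → PTrie
  | .nil, c, t => .kid c t .nil
  | .kid d t0 rest, c, t => if d = c then .kid d t rest else .kid d t0 (setKid rest c t)

-- 'node = node.setdefault(c, {})' chain for one string
def insertPath : List Char → PTrie → PTrie
  | [], k => k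
  | c :: cs, k => setKid k c (insertPath cs ((findKid k c).getD .nil))

-- the walk 'for c in s: if c not in node: break; node = node[c]; l += 1'
def matchLen : List Char → PTrie → Nat
  | [], _ => 0
  | c :: cs, k =>
      match findKid k c with
      | none => 0
      | some t => 1 + matchLen cs t

def longestPrefixStringInArray_alt (arr1 : List Int) (arr2 : List Int) : String :=
  let a1 := PySem.List.sorted arr1 (fun x => x) false
  let a2 := PySem.List.sorted arr2 (fun x => x) false
  let root := a2.foldl (fun tr x => insertPath (PySem.Int.toChars x) tr) .nil
  let best := a1.foldl (fun best x =>
      let s := PySem.Int.toChars x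
      let l := matchLen s root
      if l ≥ best.length then s.take l else best) []
  String.ofList best

-- ===== PRECONDITION & SPEC =====
def Spec_longestPrefixStringInArray (arr1 : List Int) (arr2 : List Int) (out : String) : Prop := out = longestPrefixStringInArray_alt arr1 arr2
instance (arr1 : List Int) (arr2 : List Int) (out : String) : Decidable (Spec_longestPrefixStringInArray arr1 arr2 out) := by unfold Spec_longestPrefixStringInArray; infer_instance

-- ===== CLAIM (what is proved, stated in full; the proofs are below) =====
def Claim_equal_longestPrefixStringInArray : Prop := ∀ (arr1 : List Int) (arr2 : List Int), Dom_longestPrefixStringInArray arr1 arr2 → Spec_longestPrefixStringInArray arr1 arr2 (longestPrefixStringInArray arr1 arr2)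

-- ===== LEMMAS AND PROOFS =====

-- length of the longest common prefix of two char lists
def lcpLen : List Char → List Char → Nat
  | a :: as, b :: bs => if a = b then 1 + lcpLen as bs else 0
  | _, _ => 0

-- canonical "last longest element" of a list of candidate prefixes
def pick : List (List Char) → List Char
  | [] => []
  | a :: t => if (pick t).length ≥ a.length then pick t else a

-- best lcp length of s against a set of strings
def maxL (s : List Char) : List (List Char) → Nat
  | [] => 0
  | t :: ts => max (lcpLen s t) (maxL s ts)

def takeMax (s : List Char) (l : List (List Char)) : List Char := s.take (maxL s l)

theorem findPrefixChars_eq (a b : List Char) : findPrefixChars a b = a.take (lcpLen a b) := by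
  induction a generalizing b with
  | nil => cases b <;> simp [findPrefixChars, lcpLen]
  | cons x xs ih =>
    cases b with
    | nil => simp [findPrefixChars, lcpLen]
    | cons y ys =>
      by_cases h : x = y <;>
        simp [findPrefixChars, lcpLen, h, ih, Nat.one_add, List.take_succ_cons]

theorem lcpLen_le_left (a b : List Char) : lcpLen a b ≤ a.length := by
  induction a generalizing b with
  | nil => cases b <;> simp [lcpLen]
  | cons x xs ih =>
    cases b with
    | nil => simp [lcpLen]
    | cons y ys =>
      by_cases h : x = y <;> simp [lcpLen, h]
      have := ih ys; omega

theorem lcpLen_nil_right (a : List Char) : lcpLen a [] = 0 := by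
  cases a <;> rfl

theorem maxL_le (s : List Char) (l : List (List Char)) : maxL s l ≤ s.length := by
  induction l with
  | nil => simp [maxL]
  | cons t ts ih => simp only [maxL, Nat.max_le]; exact ⟨lcpLen_le_left s t, ih⟩

theorem length_takeMax (s : List Char) (l : List (List Char)) :
    (takeMax s l).length = maxL s l := by
  simp [takeMax, Nat.min_eq_left (maxL_le s l)]

-- pick of the candidate prefixes is the take of the best length
theorem pick_map_take (s : List Char) (l : List (List Char)) :
    pick (l.map (fun t => s.take (lcpLen s t))) = takeMax s l := by
  induction l with
  | nil => simp [pick, takeMax, maxL]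
  | cons t ts ih =>
    have h1 : (s.take (lcpLen s t)).length = lcpLen s t := by
      simp [Nat.min_eq_left (lcpLen_le_left s t)]
    simp only [List.map_cons, pick, ih]
    rw [length_takeMax, h1]
    by_cases h : lcpLen s t ≤ maxL s ts
    · rw [if_pos h]; simp [takeMax, maxL, Nat.max_eq_right h]
    · rw [if_neg h]; simp [takeMax, maxL, Nat.max_eq_left (Nat.le_of_not_le h)]

-- ascending fold keeping the candidate on ≥ computes pick (B's scan)
theorem foldl_ge_pick {α : Type} (g : α → List Char) (l : List α) (m : List Char) :
    l.foldl (fun m x => if (g x).length ≥ m.length then g x else m) m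
      = if (pick (l.map g)).length ≥ m.length then pick (l.map g) else m := by
  induction l generalizing m with
  | nil => simp [pick]
  | cons a t ih =>
    simp only [List.foldl_cons, List.map_cons, ih, pick]
    split_ifs <;> first | rfl | (exfalso; omega)

-- descending fold keeping the candidate on strict > computes pick as well (A's scan)
theorem foldl_gt_pick {α : Type} (g : α → List Char) (l : List α) (m : List Char) :
    l.reverse.foldl (fun m x => if (g x).length > m.length then g x else m) m
      = if (pick (l.map g)).length > m.length then pick (l.map g) else m := by
  induction l generalizing m with
  | nil => simp [pick]
  | cons a t ih =>
    simp only [List.reverse_cons, List.foldl_append, List.foldl_cons, List.foldl_nil,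
      List.map_cons, ih, pick]
    split_ifs <;> first | rfl | (exfalso; omega)

-- a countdown-indexed fold is a fold over the reversed list
theorem foldl_pyRange_rev {α β : Type} (xs : List α) (d : α) (f : β → α → β) (init : β) :
    (PySem.List.pyRange ((xs.length : Int) - 1) (-1) (-1)).foldl
        (fun acc i => f acc (PySem.List.pyGetD xs i d)) init
      = xs.reverse.foldl f init := by
  have h1 : PySem.List.pyRange ((xs.length : Int) - 1) (-1) (-1)
      = (PySem.List.pyRange 0 (xs.length : Int) 1).reverse := by
    rw [PySem.List.pyRange_neg_one_eq_reverse]; norm_num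
  rw [h1]
  have h2 := (List.foldl_map (f := fun i => PySem.List.pyGetD xs i d) (g := f)
      (l := (PySem.List.pyRange 0 (xs.length : Int) 1).reverse) (init := init)).symm
  refine h2.trans ?_
  rw [List.map_reverse, PySem.List.map_pyGetD_pyRange_zero']

-- trie lemmas
theorem findKid_setKid (k : PTrie) (c a : Char) (x : PTrie) :
    findKid (setKid k c x) a = if a = c then some x else findKid k a := by
  induction k with
  | nil =>
    simp only [setKid, findKid]
    by_cases h : c = a
    · subst h; simp
    · have h' : ¬ a = c := fun hh => h hh.symm
      rw [if_neg h, if_neg h']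
  | kid d t rest ih1 ih2 =>
    simp only [setKid]
    by_cases hdc : d = c
    · subst hdc
      simp only [findKid]
      by_cases h : d = a
      · subst h
        simp [findKid]
      · have h' : ¬ a = d := fun hh => h hh.symm
        simp [findKid, h, h']
    · rw [if_neg hdc]
      simp only [findKid, ih2]
      by_cases h : d = a
      · have hac : ¬ a = c := fun hh => hdc (h.trans hh)
        simp [h, hac]
      · by_cases hac : a = c <;> simp [h, hac, hdc]

theorem matchLen_nil (s : List Char) : matchLen s .nil = 0 := by
  cases s <;> simp [matchLen, findKid]

theorem matchLen_insertPath (t : List Char) (s : List Char) (tr : PTrie) :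
    matchLen s (insertPath t tr) = max (lcpLen s t) (matchLen s tr) := by
  induction t generalizing s tr with
  | nil => simp [insertPath, lcpLen_nil_right]
  | cons c cs ih =>
    cases s with
    | nil => simp [matchLen, lcpLen]
    | cons a as =>
      simp only [insertPath, matchLen, findKid_setKid]
      by_cases hac : a = c
      · subst hac
        rw [if_pos rfl]
        cases hfk : findKid tr a with
        | none =>
          simp [ih, matchLen_nil, lcpLen]
        | some t' =>
          simp [ih, lcpLen]
      · rw [if_neg hac]
        have : lcpLen (a :: as) (c :: cs) = 0 := by simp [lcpLen, hac]
        rw [this]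
        simp

theorem matchLen_foldl (l : List (List Char)) (s : List Char) (tr : PTrie) :
    matchLen s (l.foldl (fun tr t => insertPath t tr) tr)
      = max (matchLen s tr) (maxL s l) := by
  induction l generalizing tr with
  | nil => simp [maxL]
  | cons t ts ih =>
    simp only [List.foldl_cons, ih, matchLen_insertPath, maxL]
    omega

-- proof-side names for the two loop bodies (definitionally equal to the ports' bodies)
def innerA (str2 : List (List Char)) (m : List Char) (s : List Char) : List Char :=
  (PySem.List.pyRange ((str2.length : Int) - 1) (-1) (-1)).foldl (fun m j =>
    let curr := findPrefixChars s (PySem.List.pyGetD str2 j [])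
    if curr.length > m.length then curr else m) m

def outerA (str1 str2 : List (List Char)) : List Char :=
  (PySem.List.pyRange ((str1.length : Int) - 1) (-1) (-1)).foldl
    (fun m i => innerA str2 m (PySem.List.pyGetD str1 i [])) []

def rootB (l2 : List Int) : PTrie :=
  l2.foldl (fun tr x => insertPath (PySem.Int.toChars x) tr) .nil

def outerB (l1 l2 : List Int) : List Char :=
  l1.foldl (fun best x =>
    if matchLen (PySem.Int.toChars x) (rootB l2) ≥ best.length
    then (PySem.Int.toChars x).take (matchLen (PySem.Int.toChars x) (rootB l2))
    else best) []

theorem innerA_eq (str2 : List (List Char)) (s m : List Char) :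
    innerA str2 m s = if (takeMax s str2).length > m.length then takeMax s str2 else m := by
  have h := foldl_pyRange_rev str2 ([] : List Char)
    (fun m t => if (findPrefixChars s t).length > m.length then findPrefixChars s t else m) m
  refine h.trans ?_
  have h2 : str2.reverse.foldl
      (fun m t => if (findPrefixChars s t).length > m.length then findPrefixChars s t else m) m
      = str2.reverse.foldl
      (fun m t => if ((fun t => s.take (lcpLen s t)) t).length > m.length
                  then (fun t => s.take (lcpLen s t)) t else m) m := by
    simp only [findPrefixChars_eq]
  refine h2.trans ?_
  rw [foldl_gt_pick (fun t => s.take (lcpLen s t)) str2 m, pick_map_take]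

theorem if_gt_nil (p : List Char) : (if p.length > 0 then p else ([] : List Char)) = p := by
  cases p <;> simp

theorem if_ge_nil (p : List Char) : (if p.length ≥ 0 then p else ([] : List Char)) = p := by
  simp

theorem outerA_eq (str1 str2 : List (List Char)) :
    outerA str1 str2 = pick (str1.map (fun s => takeMax s str2)) := by
  have h := foldl_pyRange_rev str1 ([] : List Char) (fun m s => innerA str2 m s) []
  refine h.trans ?_
  have h2 : str1.reverse.foldl (fun m s => innerA str2 m s) []
      = str1.reverse.foldl
        (fun m s => if ((fun s => takeMax s str2) s).length > m.length
                    then (fun s => takeMax s str2) s else m) [] := by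
    simp only [innerA_eq]
  refine h2.trans ?_
  rw [foldl_gt_pick (fun s => takeMax s str2) str1 []]
  exact if_gt_nil _

theorem rootB_match (l2 : List Int) (s : List Char) :
    matchLen s (rootB l2) = maxL s (l2.map PySem.Int.toChars) := by
  have h0 : rootB l2 = (l2.map PySem.Int.toChars).foldl (fun tr t => insertPath t tr) .nil :=
    (List.foldl_map (f := PySem.Int.toChars) (g := fun tr t => insertPath t tr)
      (l := l2) (init := PTrie.nil)).symm
  rw [h0, matchLen_foldl, matchLen_nil]
  omega

theorem outerB_eq (l1 l2 : List Int) :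
    outerB l1 l2
      = pick (l1.map (fun x => takeMax (PySem.Int.toChars x) (l2.map PySem.Int.toChars))) := by
  unfold outerB
  have hfun : (fun (best : List Char) (x : Int) =>
      if matchLen (PySem.Int.toChars x) (rootB l2) ≥ best.length
      then (PySem.Int.toChars x).take (matchLen (PySem.Int.toChars x) (rootB l2))
      else best)
      = (fun best x =>
      if ((fun x => takeMax (PySem.Int.toChars x) (l2.map PySem.Int.toChars)) x).length ≥ best.length
      then (fun x => takeMax (PySem.Int.toChars x) (l2.map PySem.Int.toChars)) x else best) := by
    funext best x
    rw [rootB_match, length_takeMax]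
    rfl
  rw [hfun, foldl_ge_pick (fun x => takeMax (PySem.Int.toChars x) (l2.map PySem.Int.toChars)) l1 []]
  exact if_ge_nil _

theorem main_eq (arr1 arr2 : List Int) :
    longestPrefixStringInArray arr1 arr2 = longestPrefixStringInArray_alt arr1 arr2 := by
  show String.ofList
      (outerA ((PySem.List.sorted arr1 (fun x => x) false).map PySem.Int.toChars)
              ((PySem.List.sorted arr2 (fun x => x) false).map PySem.Int.toChars))
    = String.ofList
      (outerB (PySem.List.sorted arr1 (fun x => x) false) (PySem.List.sorted arr2 (fun x => x) false))
  rw [outerA_eq, outerB_eq, List.map_map]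
  rfl

-- ===== VERDICT (by name: the statement is the Claim_ definition above) =====
theorem longestPrefixStringInArray_spec : Claim_equal_longestPrefixStringInArray := by
  intro arr1 arr2 _
  exact main_eq arr1 arr2
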